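-- pv_equiv track=rewrite | github.com/tphu14/web_phishing | src/utils.py | max_consecutive_chars
-- ===== SOURCE A (Python) =====
-- def max_consecutive_chars(text):
--     """Đếm ký tự lặp liên tiếp tối đa"""
--     if len(text) == 0:
--         return 0
--     max_count = 1
--     current_count = 1
--     for i in range(1, len(text)):
--         if text[i] == text[i-1]:
--             current_count += 1
--             max_count = max(max_count, current_count)
--         else:
--             current_count = 1
--     return max_count
-- ===== SOURCE B (Python) =====
-- def max_consecutive_chars(text):
--     """Build the list of run lengths in one pass, then take the largest (0 for empty text)."""
--     lengths = []
--     prev = None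
--     for ch in text:
--         if ch == prev:
--             lengths[-1] += 1
--         else:
--             lengths.append(1)
--             prev = ch
--     return max(lengths, default=0)
-- ===== Notes on version B (the rewrite author's own statement) =====
-- stated objective: alternative
-- what changed: B builds the list of maximal-run lengths first (incrementing the last entry or starting a new one) and then reduces with max(..., default=0), instead of A's index-pair scan maintaining current/max counters.
import Mathlib
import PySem

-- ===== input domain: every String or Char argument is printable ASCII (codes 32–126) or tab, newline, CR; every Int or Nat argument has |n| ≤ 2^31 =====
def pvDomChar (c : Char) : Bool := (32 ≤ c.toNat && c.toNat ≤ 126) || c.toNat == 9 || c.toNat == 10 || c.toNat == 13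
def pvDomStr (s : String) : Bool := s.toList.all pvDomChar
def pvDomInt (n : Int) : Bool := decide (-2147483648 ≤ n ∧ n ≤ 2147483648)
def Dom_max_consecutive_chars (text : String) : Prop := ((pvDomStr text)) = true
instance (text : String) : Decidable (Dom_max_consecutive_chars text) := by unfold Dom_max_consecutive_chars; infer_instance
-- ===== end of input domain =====

-- B builds the list of maximal-run lengths first and reduces with max(default 0); A keeps current/max counters in an index scan. Same O(n) cost, different decomposition.

-- ===== PORT A =====
def max_consecutive_chars (text : String) : Int :=
  let cs := text.toList
  if cs.length = 0 then 0
  else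
    ((PySem.List.pyRange 1 (cs.length : Int)).foldl
      (fun (s : Int × Int) (i : Int) =>
        if PySem.List.pyGetD cs i ' ' == PySem.List.pyGetD cs (i - 1) ' '
        then (max s.1 (s.2 + 1), s.2 + 1)
        else (s.1, 1))
      (1, 1)).1

-- ===== PORT B =====
-- lengths[-1] += 1 : increment the last element (only reached when the list is nonempty)
def pvIncLast : List Int → List Int
  | [] => []
  | [x] => [x + 1]
  | x :: y :: xs => x :: pvIncLast (y :: xs)

def pvStepB (st : List Int × Option Char) (ch : Char) : List Int × Option Char :=
  if some ch == st.2 then (pvIncLast st.1, st.2)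
  else (st.1 ++ [1], some ch)

def max_consecutive_chars_alt (text : String) : Int :=
  let st := text.toList.foldl pvStepB ([], none)
  PySem.List.maxD st.1 (fun y => y) 0

-- ===== PRECONDITION & SPEC =====
def Spec_max_consecutive_chars (text : String) (out : Int) : Prop := out = max_consecutive_chars_alt text
instance (text : String) (out : Int) : Decidable (Spec_max_consecutive_chars text out) := by unfold Spec_max_consecutive_chars; infer_instance

-- ===== CLAIM (what is proved, stated in full; the proofs are below) =====
def Claim_equal_max_consecutive_chars : Prop := ∀ (text : String), Dom_max_consecutive_chars text → Spec_max_consecutive_chars text (max_consecutive_chars text)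

-- ===== LEMMAS AND PROOFS =====

-- run lengths of cs, given that a run of the character p of length k is open
def pvGo : Char → Int → List Char → List Int
  | _, k, [] => [k]
  | p, k, c :: cs => if c == p then pvGo c (k + 1) cs else k :: pvGo c 1 cs

-- A's loop, recast as structural recursion over the tail (p = previous char)
def pvARec : Char → Int × Int → List Char → Int × Int
  | _, s, [] => s
  | p, s, c :: cs => if c == p then pvARec c (max s.1 (s.2 + 1), s.2 + 1) cs else pvARec c (s.1, 1) cs

theorem pvIncLast_append (L : List Int) (k : Int) : pvIncLast (L ++ [k]) = L ++ [k + 1] := by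
  induction L with
  | nil => rfl
  | cons x xs ih =>
    cases xs with
    | nil => rfl
    | cons y ys =>
      simp only [List.cons_append, pvIncLast] at ih ⊢
      rw [ih]

theorem pvGo_ne_nil (cs : List Char) (p : Char) (k : Int) : pvGo p k cs ≠ [] := by
  induction cs generalizing p k with
  | nil => simp [pvGo]
  | cons c cs ih => by_cases h : c = p <;> simp [pvGo, h, ih]

theorem pvGo_pos (cs : List Char) : ∀ (p : Char) (k : Int), 1 ≤ k → ∀ x ∈ pvGo p k cs, 1 ≤ x := by
  induction cs with
  | nil => intro p k hk x hx; simp [pvGo] at hx; omega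
  | cons c cs ih =>
    intro p k hk x hx
    by_cases h : c = p
    · exact ih c (k + 1) (by omega) x (by simpa [pvGo, h] using hx)
    · simp [pvGo, h] at hx
      rcases hx with rfl | hx
      · exact hk
      · exact ih c 1 le_rfl x hx

theorem pvGetLast (c d : Char) (cs : List Char) : (c :: cs).getLast?.getD d = cs.getLast?.getD c := by
  rw [← List.getLastD_eq_getLast?, ← List.getLastD_eq_getLast?, List.getLastD_cons]

theorem pvFoldB (cs : List Char) : ∀ (L : List Int) (k : Int) (p : Char),
    cs.foldl pvStepB (L ++ [k], some p) = (L ++ pvGo p k cs, some (cs.getLastD p)) := by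
  induction cs with
  | nil => intro L k p; simp [pvGo]
  | cons c cs ih =>
    intro L k p
    by_cases h : c = p
    · subst h
      have hstep : pvStepB (L ++ [k], some c) c = (L ++ [k + 1], some c) := by
        simp [pvStepB, pvIncLast_append]
      rw [List.foldl_cons, hstep, ih L (k + 1) c]
      simp [pvGo]
      exact (pvGetLast _ _ _).symm
    · have hstep : pvStepB (L ++ [k], some p) c = ((L ++ [k]) ++ [1], some c) := by
        simp [pvStepB, h]
      rw [List.foldl_cons, hstep, ih (L ++ [k]) 1 c]
      simp [pvGo, h]
      exact (pvGetLast _ _ _).symm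

theorem pvFoldlMax0 (L : List Int) : ∀ (a : Int), 0 ≤ a → L.foldl max a = max a (L.foldl max 0) := by
  induction L with
  | nil => intro a ha; simp; omega
  | cons x L ih =>
    intro a ha
    have h1 := ih (max a x) (by omega)
    have h2 := ih (max 0 x) (by omega)
    simp only [List.foldl_cons] at *
    rw [h1, h2]
    omega

theorem pvHeadRun (cs : List Char) : ∀ (p : Char) (k : Int), 0 ≤ k → k ≤ (pvGo p k cs).foldl max 0 := by
  induction cs with
  | nil => intro p k hk; simp [pvGo]
  | cons c cs ih =>
    intro p k hk
    by_cases h : c = p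
    · subst h
      have := ih c (k + 1) (by omega)
      simp only [pvGo, BEq.rfl, if_pos]
      omega
    · have h1 := (PySem.List.le_foldl_max (pvGo c 1 cs) (max 0 k)).1
      simp [pvGo, h]
      omega

theorem pvMain (cs : List Char) : ∀ (p : Char) (m c : Int), 1 ≤ c → c ≤ m →
    (pvARec p (m, c) cs).1 = max m ((pvGo p c cs).foldl max 0) := by
  induction cs with
  | nil => intro p m c h1 h2; simp [pvARec, pvGo]; omega
  | cons ch cs ih =>
    intro p m c h1 h2
    by_cases h : ch = p
    · subst h
      have hir := ih ch (max m (c + 1)) (c + 1) (by omega) (by omega)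
      have hhead := pvHeadRun cs ch (c + 1) (by omega)
      simp only [pvARec, pvGo, BEq.rfl, if_pos] at hir ⊢
      omega
    · have hir := ih ch m 1 le_rfl (by omega)
      have hfold := pvFoldlMax0 (pvGo ch 1 cs) (max 0 c) (by omega)
      simp [pvARec, pvGo, h] at hir ⊢
      rw [hir, hfold]
      omega

theorem pvBridgeA (cs : List Char) : ∀ (rest : List Char) (j : Nat) (s : Int × Int),
    cs.drop (j + 1) = rest → j < cs.length →
    ((PySem.List.pyRange ((j : Int) + 1) (cs.length : Int)).foldl
      (fun (s : Int × Int) (i : Int) =>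
        if PySem.List.pyGetD cs i ' ' == PySem.List.pyGetD cs (i - 1) ' '
        then (max s.1 (s.2 + 1), s.2 + 1)
        else (s.1, 1)) s)
    = pvARec (cs.getD j ' ') s rest := by
  intro rest
  induction rest with
  | nil =>
    intro j s hdrop hj
    have hlen : cs.length = j + 1 := by
      have := List.drop_eq_nil_iff.mp hdrop
      omega
    rw [PySem.List.pyRange_one_eq_nil (by omega)]
    simp [pvARec]
  | cons c rest' ih =>
    intro j s hdrop hj
    have hlt : j + 1 < cs.length := by
      rcases Nat.lt_or_ge (j + 1) cs.length with hx | hx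
      · exact hx
      · rw [List.drop_eq_nil_iff.mpr hx] at hdrop
        simp at hdrop
    have hget : cs.getD (j + 1) ' ' = c := by
      have h0 : (cs.drop (j + 1)).getD 0 ' ' = c := by rw [hdrop]; rfl
      simpa [List.getD_eq_getElem?_getD, List.getElem?_drop] using h0
    have hdrop' : cs.drop (j + 1 + 1) = rest' := by
      have he : cs.drop (j + 1 + 1) = (cs.drop (j + 1)).drop 1 := by
        rw [List.drop_drop]
      rw [he, hdrop]; rfl
    rw [PySem.List.pyRange_one_cons (by exact_mod_cast hlt), List.foldl_cons]
    have e1 : PySem.List.pyGetD cs ((j : Int) + 1) ' ' = cs.getD (j + 1) ' ' := by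
      have := PySem.List.pyGetD_natCast cs (j + 1) ' '
      push_cast at this ⊢; exact this
    have e2 : PySem.List.pyGetD cs ((j : Int) + 1 - 1) ' ' = cs.getD j ' ' := by
      have := PySem.List.pyGetD_natCast cs j ' '
      simp at this
      rw [show (j : Int) + 1 - 1 = (j : Int) by ring, PySem.List.pyGetD_natCast]
    have ecast : (j : Int) + 1 + 1 = ((j + 1 : Nat) : Int) + 1 := by push_cast; ring
    rw [e1, e2, hget]
    by_cases h : c = cs.getD j ' '
    · rw [if_pos (by simpa using h), ecast, ih (j + 1) _ hdrop' hlt, hget, ← h]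
      simp [pvARec]
    · rw [if_neg (by simpa using h), ecast, ih (j + 1) _ hdrop' hlt, hget]
      simp only [pvARec]
      rw [if_neg (by simpa using h)]

theorem pvMaxD_nonneg (L : List Int) (hL : L ≠ []) (h0 : ∀ x ∈ L, 0 ≤ x) :
    PySem.List.maxD L (fun y => y) 0 = L.foldl max 0 := by
  cases L with
  | nil => exact absurd rfl hL
  | cons x t =>
    have hx : max 0 x = x := by have := h0 x (by simp); omega
    rw [PySem.List.maxD, PySem.List.max?_id_cons]
    simp [hx]

-- ===== VERDICT (by name: the statement is the Claim_ definition above) =====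
theorem max_consecutive_chars_spec : Claim_equal_max_consecutive_chars := by
  intro text _
  unfold Spec_max_consecutive_chars max_consecutive_chars max_consecutive_chars_alt
  cases hcs : text.toList with
  | nil => simp [PySem.List.maxD, PySem.List.max?]
  | cons c0 rest =>
    rw [if_neg (by simp)]
    have hb0 : pvStepB ([], none) c0 = ([] ++ [(1 : Int)], some c0) := by
      simp [pvStepB]
    have hbridge := pvBridgeA (c0 :: rest) rest 0 (1, 1) (by simp) (by simp)
    simp only [Nat.cast_zero, zero_add, List.getD_cons_zero] at hbridge
    rw [hbridge]
    rw [List.foldl_cons, hb0, pvFoldB rest [] 1 c0]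
    simp only [List.nil_append]
    rw [pvMain rest c0 1 1 le_rfl le_rfl,
        pvMaxD_nonneg _ (pvGo_ne_nil rest c0 1) (fun x hx => by
          have := pvGo_pos rest c0 1 le_rfl x hx; omega)]
    have := pvHeadRun rest c0 1 (by omega)
    omega
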